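-- pv_equiv track=rewrite | github.com/sichkar-valentyn/yield_function_in_Python | yield_function.py | generator
-- ===== SOURCE A (Python) =====
-- def generator(n):
--     # Setting the variable to control the number of output integers in the sequence
--     count = 0
--     # Going through given sequence from '1' to 'n + 1' and break when it's reached 'n' output integers
--     for i in range(1, n + 1):
--         # Generating sequence of 'i' times repeated integers of 'i'
--         for j in range(i):
--             # Creating a rule to break when sequence is a size of 'n'
--             count += 1
--             if count > n:
--                 return  # It is also possible to write here 'break'
--             # Generating numbers of the sequence as string variables
--             # By using 'yield' generator-function will remember where it was previous time
--             yield str(i)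
-- ===== SOURCE B (Python) =====
-- def generator(n):
--     # Build the first n terms block-wise: whole blocks [str(i)]*i while they
--     # fit, then a partial block for the remainder; yield them all at the end.
--     out = []
--     i = 1
--     while len(out) + i <= n:
--         out.extend([str(i)] * i)
--         i += 1
--     out.extend([str(i)] * (n - len(out)))
--     yield from out
-- ===== Notes on version B (the rewrite author's own statement) =====
-- stated objective: alternative
-- what changed: Replaces the per-element nested count-and-break loops with block-wise construction: append whole blocks [str(i)]*i while they fit, then one partial block for the remainder.
import Mathlib
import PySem

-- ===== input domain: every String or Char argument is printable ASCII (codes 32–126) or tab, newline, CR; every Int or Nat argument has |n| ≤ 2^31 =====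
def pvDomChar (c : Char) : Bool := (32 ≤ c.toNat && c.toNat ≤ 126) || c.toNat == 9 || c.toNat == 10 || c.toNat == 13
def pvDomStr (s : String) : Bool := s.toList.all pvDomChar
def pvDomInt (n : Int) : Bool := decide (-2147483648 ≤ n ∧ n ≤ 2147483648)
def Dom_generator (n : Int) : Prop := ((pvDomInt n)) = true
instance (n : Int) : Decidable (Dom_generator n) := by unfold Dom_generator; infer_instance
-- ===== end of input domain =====

-- B replaces A's per-element nested count-and-break loops by block-wise construction
-- (whole blocks while they fit, then one partial block); same cost, different shape.

-- ===== PORT A =====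
-- one inner-loop body step of A: count += 1; if count > n: return; yield str(i)
def innerStep (n : Int) (t : String) (s : Int × List String × Bool) : Int × List String × Bool :=
  if s.2.2 then s
  else
    if s.1 + 1 > n then (s.1 + 1, s.2.1, true)
    else (s.1 + 1, s.2.1 ++ [t], false)

-- state: (count, yielded-so-far, returned?)
def generator (n : Int) : List String :=
  ((PySem.List.pyRange 1 (n + 1) 1).foldl
    (fun s i => (PySem.List.pyRange 0 i 1).foldl (fun s _j => innerStep n (PySem.Int.toStr i) s) s)
    (0, [], false)).2.1

-- ===== PORT B =====
-- the while loop of B: extend out with the whole block [str(i)]*i while it fits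
def altLoop (n i : Int) (out : List String) (hi : 1 ≤ i) : Int × List String :=
  if h : (out.length : Int) + i ≤ n then
    altLoop n (i + 1) (out ++ List.replicate i.toNat (PySem.Int.toStr i)) (by omega)
  else (i, out)
termination_by (n - out.length).toNat
decreasing_by simp only [List.length_append, List.length_replicate]; omega

def generator_alt (n : Int) : List String :=
  let r := altLoop n 1 [] (by decide)
  r.2 ++ List.replicate (n - r.2.length).toNat (PySem.Int.toStr r.1)

-- ===== PRECONDITION & SPEC =====
def Spec_generator (n : Int) (out : List String) : Prop := out = generator_alt n
instance (n : Int) (out : List String) : Decidable (Spec_generator n out) := by unfold Spec_generator; infer_instance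

-- ===== CLAIM (what is proved, stated in full; the proofs are below) =====
def Claim_equal_generator : Prop := ∀ (n : Int), Dom_generator n → Spec_generator n (generator n)

-- ===== LEMMAS AND PROOFS =====

-- the first m full blocks of the sequence 1, 2 2, 3 3 3, …
def blocks (m : Nat) : List String :=
  (List.range m).flatMap (fun t => List.replicate (t + 1) (PySem.Int.toStr (1 + (t : Int))))

theorem blocks_succ (m : Nat) :
    blocks (m + 1) = blocks m ++ List.replicate (m + 1) (PySem.Int.toStr (1 + (m : Int))) := by
  simp [blocks, List.range_succ]

theorem length_blocks_lb (m : Nat) : m ≤ (blocks m).length := by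
  induction m with
  | zero => simp [blocks]
  | succ k ih => rw [blocks_succ]; simp only [List.length_append, List.length_replicate]; omega

theorem blocks_prefix {a b : Nat} (h : a ≤ b) : blocks a <+: blocks b := by
  induction b with
  | zero => simp_all
  | succ k ih =>
    rcases Nat.lt_or_ge a (k + 1) with hl | hg
    · exact (ih (by omega)).trans ⟨_, (blocks_succ k).symm⟩
    · have : a = k + 1 := by omega
      subst this; exact List.prefix_refl _

theorem take_eq_of_prefix {l1 l2 : List String} (h : l1 <+: l2) {k : Nat} (hk : k ≤ l1.length) :
    l1.take k = l2.take k := by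
  obtain ⟨t, rfl⟩ := h
  rw [List.take_append_of_le_length hk]

theorem take_blocks_eq {a b : Nat} {k : Nat} (ha : k ≤ (blocks a).length) (hb : k ≤ (blocks b).length) :
    (blocks a).take k = (blocks b).take k := by
  rcases le_total a b with h | h
  · exact take_eq_of_prefix (blocks_prefix h) ha
  · exact (take_eq_of_prefix (blocks_prefix h) hb).symm

theorem innerStep_done (n : Int) (t : String) (c : Int) (acc : List String) :
    innerStep n t (c, acc, true) = (c, acc, true) := by simp [innerStep]

theorem innerStep_stop (n : Int) (t : String) (c : Int) (acc : List String) (h : c + 1 > n) :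
    innerStep n t (c, acc, false) = (c + 1, acc, true) := by simp [innerStep, h]

theorem innerStep_go (n : Int) (t : String) (c : Int) (acc : List String) (h : ¬ c + 1 > n) :
    innerStep n t (c, acc, false) = (c + 1, acc ++ [t], false) := by simp [innerStep]; omega

theorem innerDone (n : Int) (t : String) (l : List Int) (c : Int) (acc : List String) :
    l.foldl (fun s _j => innerStep n t s) (c, acc, true) = (c, acc, true) := by
  induction l with
  | nil => rfl
  | cons x xs ih =>
    rw [List.foldl_cons]
    show List.foldl _ (innerStep n t (c, acc, true)) xs = _
    rw [innerStep_done]; exact ih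

theorem innerA_le (n : Int) (t : String) (l : List Int) (c : Int) (acc : List String)
    (h : c + l.length ≤ n) :
    l.foldl (fun s _j => innerStep n t s) (c, acc, false)
      = (c + l.length, acc ++ List.replicate l.length t, false) := by
  induction l generalizing c acc with
  | nil => simp
  | cons x xs ih =>
    have hc : ¬ c + 1 > n := by simp at h; omega
    rw [List.foldl_cons]
    show List.foldl _ (innerStep n t (c, acc, false)) xs = _
    rw [innerStep_go n t c acc hc, ih (c + 1) (acc ++ [t]) (by simp at h ⊢; omega)]
    refine Prod.ext ?_ (Prod.ext ?_ rfl)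
    · simp only [List.length_cons]; push_cast; ring
    · simp only [List.length_cons, List.append_assoc, List.singleton_append, List.append_cancel_left_eq]
      rw [← List.replicate_succ, List.replicate_succ']

theorem innerA_gt (n : Int) (t : String) (l : List Int) (c : Int) (acc : List String)
    (hc : c ≤ n) (h : n < c + l.length) :
    l.foldl (fun s _j => innerStep n t s) (c, acc, false)
      = (n + 1, acc ++ List.replicate (n - c).toNat t, true) := by
  induction l generalizing c acc with
  | nil => simp at h; omega
  | cons x xs ih =>
    rw [List.foldl_cons]
    show List.foldl _ (innerStep n t (c, acc, false)) xs = _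
    by_cases hstop : c + 1 > n
    · have hcn : c = n := by omega
      rw [innerStep_stop n t c acc hstop, innerDone]
      simp [hcn]
    · rw [innerStep_go n t c acc hstop,
         ih (c + 1) (acc ++ [t]) (by omega) (by simp at h ⊢; omega)]
      have hh : (n - c).toNat = (n - (c + 1)).toNat + 1 := by omega
      rw [hh]
      simp only [List.append_assoc, List.singleton_append]
      rw [← List.replicate_succ, List.replicate_succ']

theorem outer_inv (n : Int) (hn : 0 ≤ n) (m : Nat) (hm : (m : Int) ≤ n) :
    ((List.range m).map (fun k : Nat => 1 + (k : Int))).foldl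
      (fun s i => (PySem.List.pyRange 0 i 1).foldl (fun s _j => innerStep n (PySem.Int.toStr i) s) s)
      (0, [], false)
    = if ((blocks m).length : Int) ≤ n then (((blocks m).length : Int), blocks m, false)
      else (n + 1, (blocks m).take n.toNat, true) := by
  induction m with
  | zero =>
    have h0 : blocks 0 = [] := by simp [blocks]
    rw [if_pos (by simp [h0]; omega)]
    simp [h0]
  | succ k ih =>
    rw [List.range_succ, List.map_append, List.foldl_append,
        ih (by push_cast at hm ⊢; omega)]
    simp only [List.map_cons, List.map_nil, List.foldl_cons, List.foldl_nil]
    have hL : (PySem.List.pyRange 0 (1 + (k : Int)) 1).length = k + 1 := by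
      rw [PySem.List.length_pyRange_one]; omega
    have hLs : (blocks (k + 1)).length = (blocks k).length + (k + 1) := by
      rw [blocks_succ]; simp
    by_cases hk : ((blocks k).length : Int) ≤ n
    · rw [if_pos hk]
      by_cases hk1 : ((blocks (k + 1)).length : Int) ≤ n
      · rw [innerA_le n _ _ _ _ (by rw [hL]; rw [hLs] at hk1; push_cast at hk1 ⊢; omega)]
        rw [if_pos hk1, hL, blocks_succ]
        refine Prod.ext ?_ (Prod.ext rfl rfl)
        simp only [List.length_append, List.length_replicate]
        push_cast; ring
      · rw [innerA_gt n _ _ _ _ hk (by rw [hL]; rw [hLs] at hk1; push_cast at hk1 ⊢; omega)]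
        rw [if_neg hk1]
        refine Prod.ext rfl (Prod.ext ?_ rfl)
        rw [blocks_succ, List.take_append, List.take_of_length_le (by omega), List.take_replicate]
        congr 1
        have h1 : n.toNat - (blocks k).length = (n - (blocks k).length).toNat := by omega
        have h2 : (n - ((blocks k).length : Int)).toNat ≤ k + 1 := by
          rw [hLs] at hk1; push_cast at hk1; omega
        rw [h1, min_eq_left h2]
    · rw [if_neg hk]
      rw [innerDone]
      have hk1 : ¬ ((blocks (k + 1)).length : Int) ≤ n := by rw [hLs]; push_cast; omega
      rw [if_neg hk1]
      refine Prod.ext rfl (Prod.ext ?_ rfl)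
      rw [blocks_succ, List.take_append]
      have h0 : n.toNat - (blocks k).length = 0 := by omega
      simp [h0]

theorem genA_eq (n : Int) : generator n = (blocks n.toNat).take n.toNat := by
  unfold generator
  rw [PySem.List.pyRange_one]
  have h1 : (n + 1 - 1).toNat = n.toNat := by omega
  rw [h1]
  rcases le_or_gt 0 n with hn | hn
  · rw [outer_inv n hn n.toNat (by omega)]
    by_cases hc : ((blocks n.toNat).length : Int) ≤ n
    · rw [if_pos hc]
      have := length_blocks_lb n.toNat
      rw [List.take_of_length_le (by omega)]
    · rw [if_neg hc]
  · have h2 : n.toNat = 0 := by omega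
    simp [h2, blocks]

theorem altLoop_congr (n : Int) {i1 i2 : Int} {o1 o2 : List String} (hi : i1 = i2)
    (ho : o1 = o2) (h1 : 1 ≤ i1) (h2 : 1 ≤ i2) : altLoop n i1 o1 h1 = altLoop n i2 o2 h2 := by
  subst hi; subst ho; rfl

theorem altLoop_inv (n : Int) (hn : 0 ≤ n) (m : Nat) (hm : ((blocks m).length : Int) ≤ n) :
    ∃ m', ((blocks m').length : Int) ≤ n ∧ n < (blocks m').length + (m' + 1) ∧
      altLoop n (1 + m) (blocks m) (by omega) = (1 + (m' : Int), blocks m') := by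
  have hfuel : ∀ (k : Nat) (m : Nat), n.toNat + 1 - m ≤ k → ((blocks m).length : Int) ≤ n →
      ∃ m', ((blocks m').length : Int) ≤ n ∧ n < (blocks m').length + (m' + 1) ∧
        altLoop n (1 + m) (blocks m) (by omega) = (1 + (m' : Int), blocks m') := by
    intro k
    induction k with
    | zero =>
      intro m hk hm
      have := length_blocks_lb m
      omega
    | succ k ih =>
      intro m hk hm
      rw [altLoop]
      by_cases h : ((blocks m).length : Int) + (1 + (m : Int)) ≤ n
      · rw [dif_pos h]
        have hb : blocks m ++ List.replicate (1 + (m : Int)).toNat (PySem.Int.toStr (1 + (m : Int)))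
            = blocks (m + 1) := by
          have hrep : (1 + (m : Int)).toNat = m + 1 := by omega
          rw [hrep, ← blocks_succ]
        have hm1 : ((blocks (m + 1)).length : Int) ≤ n := by
          rw [blocks_succ]; simp only [List.length_append, List.length_replicate]; push_cast; omega
        obtain ⟨m', h1, h2, h3⟩ := ih (m + 1) (by have := length_blocks_lb m; omega) hm1
        refine ⟨m', h1, h2, ?_⟩
        rw [← h3]
        exact altLoop_congr n (by omega) hb (by omega) (by omega)
      · rw [dif_neg h]
        exact ⟨m, hm, by omega, rfl⟩
  exact hfuel (n.toNat + 1 - m) m (by omega) hm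

theorem genB_eq (n : Int) : generator_alt n = (blocks n.toNat).take n.toNat := by
  unfold generator_alt
  rcases le_or_gt 0 n with hn | hn
  · have h0 : blocks 0 = ([] : List String) := by simp [blocks]
    have hm0 : ((blocks 0).length : Int) ≤ n := by rw [h0]; simp; omega
    obtain ⟨m', h1, h2, h3⟩ := altLoop_inv n hn 0 hm0
    have he : altLoop n 1 [] (by decide) = (1 + (m' : Int), blocks m') := by
      rw [← h3]
      exact altLoop_congr n (by omega) h0.symm (by decide) (by omega)
    rw [he]
    have hcalc : blocks m' ++ List.replicate (n - ((blocks m').length : Int)).toNat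
          (PySem.Int.toStr (1 + (m' : Int))) = (blocks (m' + 1)).take n.toNat := by
      rw [blocks_succ, List.take_append, List.take_of_length_le (by omega), List.take_replicate]
      congr 1
      have ha : n.toNat - (blocks m').length = (n - ((blocks m').length : Int)).toNat := by omega
      rw [ha, min_eq_left (by omega)]
    rw [hcalc]
    apply take_blocks_eq
    · rw [blocks_succ]; simp; omega
    · have := length_blocks_lb n.toNat; omega
  · rw [altLoop, dif_neg (by simp; omega)]
    have hz : (n - (([] : List String).length : Int)).toNat = 0 := by simp; omega
    have hz2 : n.toNat = 0 := by omega
    simp [hz2]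

-- ===== VERDICT (by name: the statement is the Claim_ definition above) =====
theorem generator_spec : Claim_equal_generator := by
  intro n _
  unfold Spec_generator
  rw [genA_eq, genB_eq]
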